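-- pv_equiv track=rewrite | github.com/Egoist-debug/symcc | tools/dns_diff/follow_diff.py | _resolve_follow_diff_variant_name
-- ===== SOURCE A (Python) =====
-- from typing import Any, Dict, Iterable, List, Mapping, Optional, Sequence, Set, Tuple
--
-- FOLLOW_DIFF_TOGGLE_ENV_DEFAULTS: Dict[str, str] = {
--     "ENABLE_DST1_MUTATOR": "0",
--     "ENABLE_CACHE_DELTA": "1",
--     "ENABLE_TRIAGE": "1",
--     "ENABLE_SYMCC": "1",
-- }
--
-- FOLLOW_DIFF_TOGGLE_ENV_TO_ABLATION_KEY: Dict[str, str] = {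
--     "ENABLE_DST1_MUTATOR": "mutator",
--     "ENABLE_CACHE_DELTA": "cache-delta",
--     "ENABLE_TRIAGE": "triage",
--     "ENABLE_SYMCC": "symcc",
-- }
--
-- FOLLOW_DIFF_VARIANT_ENVS: Dict[str, Dict[str, str]] = {
--     "full_stack": {
--         "ENABLE_DST1_MUTATOR": "1",
--         "ENABLE_CACHE_DELTA": "1",
--         "ENABLE_TRIAGE": "1",
--         "ENABLE_SYMCC": "1",
--     },
--     "afl_only": {
--         "ENABLE_DST1_MUTATOR": "1",
--         "ENABLE_CACHE_DELTA": "1",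
--         "ENABLE_TRIAGE": "1",
--         "ENABLE_SYMCC": "0",
--     },
--     "no_mutator": {
--         "ENABLE_DST1_MUTATOR": "0",
--         "ENABLE_CACHE_DELTA": "1",
--         "ENABLE_TRIAGE": "1",
--         "ENABLE_SYMCC": "1",
--     },
--     "no_cache_delta": {
--         "ENABLE_DST1_MUTATOR": "1",
--         "ENABLE_CACHE_DELTA": "0",
--         "ENABLE_TRIAGE": "1",
--         "ENABLE_SYMCC": "1",
--     },
-- }
--
-- def _resolve_follow_diff_variant_name(toggle_env: Mapping[str, str]) -> str:
--     normalized_env = {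
--         env_name: "1" if toggle_env.get(env_name) == "1" else "0"
--         for env_name in FOLLOW_DIFF_TOGGLE_ENV_DEFAULTS
--     }
--     for variant_name, expected_env in FOLLOW_DIFF_VARIANT_ENVS.items():
--         if normalized_env == expected_env:
--             return variant_name
--
--     custom_parts = [
--         f"{FOLLOW_DIFF_TOGGLE_ENV_TO_ABLATION_KEY[env_name]}-"
--         f"{'on' if normalized_env[env_name] == '1' else 'off'}"
--         for env_name in FOLLOW_DIFF_TOGGLE_ENV_DEFAULTS
--     ]
--     return "custom-" + "-".join(custom_parts)
-- ===== SOURCE B (Python) =====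
-- FOLLOW_DIFF_TOGGLE_ENV_DEFAULTS = {
--     "ENABLE_DST1_MUTATOR": "0",
--     "ENABLE_CACHE_DELTA": "1",
--     "ENABLE_TRIAGE": "1",
--     "ENABLE_SYMCC": "1",
-- }
--
-- FOLLOW_DIFF_TOGGLE_ENV_TO_ABLATION_KEY = {
--     "ENABLE_DST1_MUTATOR": "mutator",
--     "ENABLE_CACHE_DELTA": "cache-delta",
--     "ENABLE_TRIAGE": "triage",
--     "ENABLE_SYMCC": "symcc",
-- }
--
-- # Named variants, keyed by the 4-bit toggle code (mutator,cache,triage,symcc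
-- # as bits 3..0): full_stack=0b1111, afl_only=0b1110, no_mutator=0b0111,
-- # no_cache_delta=0b1011.
-- _VARIANT_BY_CODE = {
--     0b1111: "full_stack",
--     0b1110: "afl_only",
--     0b0111: "no_mutator",
--     0b1011: "no_cache_delta",
-- }
--
-- _ABLATION_KEYS = list(FOLLOW_DIFF_TOGGLE_ENV_TO_ABLATION_KEY.values())
--
--
-- def _name_for_code(code):
--     name = _VARIANT_BY_CODE.get(code)
--     if name is not None:
--         return name
--     parts = [
--         f"{_ABLATION_KEYS[i]}-{'on' if (code >> (3 - i)) & 1 else 'off'}"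
--         for i in range(4)
--     ]
--     return "custom-" + "-".join(parts)
--
--
-- # All 16 possible answers, tabulated once at import time.
-- _NAME_BY_CODE = [_name_for_code(c) for c in range(16)]
--
--
-- def _resolve_follow_diff_variant_name(toggle_env):
--     code = 0
--     for k in FOLLOW_DIFF_TOGGLE_ENV_DEFAULTS:
--         code = (code << 1) | (1 if toggle_env.get(k) == "1" else 0)
--     return _NAME_BY_CODE[code]
-- ===== Notes on version B (the rewrite author's own statement) =====
-- stated objective: alternative
-- what changed: B packs the four toggles into one 4-bit integer code and returns the answer by indexing a 16-entry table of all possible results (named variants and custom- strings) precomputed once, instead of A's per-variant scan comparing whole normalized dicts and on-the-fly custom-string construction.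
import Mathlib
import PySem

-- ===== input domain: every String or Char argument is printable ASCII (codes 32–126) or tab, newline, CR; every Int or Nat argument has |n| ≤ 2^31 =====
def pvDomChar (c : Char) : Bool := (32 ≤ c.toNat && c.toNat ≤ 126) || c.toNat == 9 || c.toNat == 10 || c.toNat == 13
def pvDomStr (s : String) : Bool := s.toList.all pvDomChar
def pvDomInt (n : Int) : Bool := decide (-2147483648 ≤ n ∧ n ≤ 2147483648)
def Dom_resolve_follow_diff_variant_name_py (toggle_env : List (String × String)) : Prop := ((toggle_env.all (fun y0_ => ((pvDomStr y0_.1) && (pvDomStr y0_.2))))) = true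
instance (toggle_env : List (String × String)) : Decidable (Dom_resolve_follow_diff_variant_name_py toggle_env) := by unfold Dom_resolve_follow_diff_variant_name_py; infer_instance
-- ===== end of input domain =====

-- B encodes the four toggles as one 4-bit integer and answers by indexing a fully
-- precomputed 16-entry table (alternative decomposition; same output everywhere).

-- ===== PORT A =====

def followDiffToggleEnvDefaults : PySem.Dict String String :=
  PySem.Dict.mk [("ENABLE_DST1_MUTATOR", "0"), ("ENABLE_CACHE_DELTA", "1"),
                 ("ENABLE_TRIAGE", "1"), ("ENABLE_SYMCC", "1")]

def followDiffToggleEnvToAblationKey : PySem.Dict String String :=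
  PySem.Dict.mk [("ENABLE_DST1_MUTATOR", "mutator"), ("ENABLE_CACHE_DELTA", "cache-delta"),
                 ("ENABLE_TRIAGE", "triage"), ("ENABLE_SYMCC", "symcc")]

def followDiffVariantEnvs : PySem.Dict String (PySem.Dict String String) :=
  PySem.Dict.mk
    [("full_stack", PySem.Dict.mk [("ENABLE_DST1_MUTATOR", "1"), ("ENABLE_CACHE_DELTA", "1"), ("ENABLE_TRIAGE", "1"), ("ENABLE_SYMCC", "1")]),
     ("afl_only", PySem.Dict.mk [("ENABLE_DST1_MUTATOR", "1"), ("ENABLE_CACHE_DELTA", "1"), ("ENABLE_TRIAGE", "1"), ("ENABLE_SYMCC", "0")]),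
     ("no_mutator", PySem.Dict.mk [("ENABLE_DST1_MUTATOR", "0"), ("ENABLE_CACHE_DELTA", "1"), ("ENABLE_TRIAGE", "1"), ("ENABLE_SYMCC", "1")]),
     ("no_cache_delta", PySem.Dict.mk [("ENABLE_DST1_MUTATOR", "1"), ("ENABLE_CACHE_DELTA", "0"), ("ENABLE_TRIAGE", "1"), ("ENABLE_SYMCC", "1")])]

-- Python's dict == ignores insertion order; here normalized_env is built in
-- FOLLOW_DIFF_TOGGLE_ENV_DEFAULTS key order and every variant dict is written with its
-- keys in that same order, so Dict's item-list == is exact for these comparisons.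
def resolve_follow_diff_variant_name_py (toggle_env : List (String × String)) : String :=
  let tdict := PySem.Dict.mk toggle_env
  let normalized_env : PySem.Dict String String :=
    followDiffToggleEnvDefaults.keys.foldl
      (fun d env_name =>
        d.insert env_name (if PySem.Dict.get? tdict env_name == some "1" then "1" else "0"))
      PySem.Dict.empty
  match followDiffVariantEnvs.items.find? (fun p => normalized_env == p.2) with
  | some (variant_name, _) => variant_name
  | none =>
      let custom_parts :=
        followDiffToggleEnvDefaults.keys.map
          (fun env_name =>
            (PySem.Dict.getD followDiffToggleEnvToAblationKey env_name "") ++ "-" ++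
            (if PySem.Dict.getD normalized_env env_name "" == "1" then "on" else "off"))
      "custom-" ++ PySem.Str.join "-" custom_parts

-- ===== PORT B =====

-- Source B's _VARIANT_BY_CODE: named variants keyed by the 4-bit toggle code.
def followDiffVariantByCode : PySem.Dict Int String :=
  PySem.Dict.mk [(15, "full_stack"), (14, "afl_only"), (7, "no_mutator"), (11, "no_cache_delta")]

def followDiffAblationKeys : List String := followDiffToggleEnvToAblationKey.values

-- Source B's _name_for_code.  (code >> (3-i)) & 1 is ported as floordiv/mod by a power of
-- two, which is exact for the nonnegative codes 0..15 this is applied to.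
def followDiffNameForCode (code : Int) : String :=
  match PySem.Dict.get? followDiffVariantByCode code with
  | some name => name
  | none =>
      let parts := (PySem.List.pyRange 0 4 1).map (fun i =>
        (PySem.List.pyGet? followDiffAblationKeys i).getD "" ++ "-" ++
        (if PySem.Int.mod (PySem.Int.floordiv code (2 ^ (3 - i).toNat)) 2 == 1 then "on" else "off"))
      "custom-" ++ PySem.Str.join "-" parts

-- Source B's _NAME_BY_CODE: all 16 possible answers, tabulated once.
def followDiffNameByCode : List String := (PySem.List.pyRange 0 16 1).map followDiffNameForCode

def resolve_follow_diff_variant_name_py_alt (toggle_env : List (String × String)) : String :=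
  let tdict := PySem.Dict.mk toggle_env
  let code : Int :=
    followDiffToggleEnvDefaults.keys.foldl
      (fun c k => c * 2 + (if PySem.Dict.get? tdict k == some "1" then 1 else 0)) 0
  (PySem.List.pyGet? followDiffNameByCode code).getD ""  -- code is always 0..15, in range

-- ===== PRECONDITION & SPEC =====
def Spec_resolve_follow_diff_variant_name_py (toggle_env : List (String × String)) (out : String) : Prop := out = resolve_follow_diff_variant_name_py_alt toggle_env
instance (toggle_env : List (String × String)) (out : String) : Decidable (Spec_resolve_follow_diff_variant_name_py toggle_env out) := by unfold Spec_resolve_follow_diff_variant_name_py; infer_instance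

-- ===== CLAIM (what is proved, stated in full; the proofs are below) =====
def Claim_equal_resolve_follow_diff_variant_name_py : Prop := ∀ (toggle_env : List (String × String)), Dom_resolve_follow_diff_variant_name_py toggle_env → Spec_resolve_follow_diff_variant_name_py toggle_env (resolve_follow_diff_variant_name_py toggle_env)

-- ===== LEMMAS AND PROOFS =====

-- Both results are the same function of the four lookup booleans: 16 cases by decide.
theorem follow_diff_core (b1 b2 b3 b4 : Bool) :
    (let normalized_env : PySem.Dict String String :=
      followDiffToggleEnvDefaults.keys.foldl
        (fun d env_name =>
          d.insert env_name
            (if (match env_name with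
                 | "ENABLE_DST1_MUTATOR" => b1 | "ENABLE_CACHE_DELTA" => b2
                 | "ENABLE_TRIAGE" => b3 | _ => b4) then "1" else "0"))
        PySem.Dict.empty
     match followDiffVariantEnvs.items.find? (fun p => normalized_env == p.2) with
     | some (variant_name, _) => variant_name
     | none =>
        let custom_parts :=
          followDiffToggleEnvDefaults.keys.map
            (fun env_name =>
              (PySem.Dict.getD followDiffToggleEnvToAblationKey env_name "") ++ "-" ++
              (if PySem.Dict.getD normalized_env env_name "" == "1" then "on" else "off"))
        "custom-" ++ PySem.Str.join "-" custom_parts) =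
    (let code : Int :=
      [b1, b2, b3, b4].foldl (fun c b => c * 2 + (if b then 1 else 0)) 0
     (PySem.List.pyGet? followDiffNameByCode code).getD "") := by
  cases b1 <;> cases b2 <;> cases b3 <;> cases b4 <;> decide

-- ===== VERDICT (by name: the statement is the Claim_ definition above) =====
theorem resolve_follow_diff_variant_name_py_spec : Claim_equal_resolve_follow_diff_variant_name_py := by
  intro toggle_env _
  unfold Spec_resolve_follow_diff_variant_name_py
  unfold resolve_follow_diff_variant_name_py resolve_follow_diff_variant_name_py_alt
  have h := follow_diff_core
    (PySem.Dict.get? (PySem.Dict.mk toggle_env) "ENABLE_DST1_MUTATOR" == some "1")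
    (PySem.Dict.get? (PySem.Dict.mk toggle_env) "ENABLE_CACHE_DELTA" == some "1")
    (PySem.Dict.get? (PySem.Dict.mk toggle_env) "ENABLE_TRIAGE" == some "1")
    (PySem.Dict.get? (PySem.Dict.mk toggle_env) "ENABLE_SYMCC" == some "1")
  simpa [followDiffToggleEnvDefaults, PySem.Dict.keys_mk, List.foldl] using h
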